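-- pv_equiv track=rewrite | github.com/eunkyeongCho/Promtree | retriever/pdf_chunking_processor.py | is_table_line
-- ===== SOURCE A (Python) =====
-- def is_table_line(line: str) -> bool:
--     """
--     라인이 표 라인인지 확인 (더 정확한 표 감지)
--
--     Args:
--         line: 확인할 라인
--
--     Returns:
--         bool: 표 라인 여부
--     """
--     line = line.strip()
--
--     # 빈 줄이면 표가 아님
--     if not line:
--         return False
--
--     # |로 시작하고 끝나며, 중간에 |가 있는지 확인
--     if line.startswith('|') and line.endswith('|'):
--         # | 사이에 내용이 있는지 확인
--         parts = line.split('|')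
--         if len(parts) >= 3:  # 시작|내용|끝
--             # 각 부분에 실제 내용이 있는지 확인
--             content_parts = [part.strip() for part in parts[1:-1]]
--             if any(part for part in content_parts):  # 빈 부분이 아닌 부분이 있으면
--                 return True
--
--     return False
-- ===== SOURCE B (Python) =====
-- def is_table_line(line: str) -> bool:
--     s = line.strip()
--     if len(s) < 2 or s[0] != '|' or s[-1] != '|':
--         return False
--     return any(c != '|' and not c.isspace() for c in s[1:-1])
-- ===== Notes on version B (the rewrite author's own statement) =====
-- stated objective: simpler
-- what changed: Replaces splitting on the pipe character into a parts list plus slicing plus a stripped-parts any() by a single scan of the stripped line's interior for a character that is neither a pipe nor whitespace, after checking the length and the two boundary pipes directly.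
import Mathlib
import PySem

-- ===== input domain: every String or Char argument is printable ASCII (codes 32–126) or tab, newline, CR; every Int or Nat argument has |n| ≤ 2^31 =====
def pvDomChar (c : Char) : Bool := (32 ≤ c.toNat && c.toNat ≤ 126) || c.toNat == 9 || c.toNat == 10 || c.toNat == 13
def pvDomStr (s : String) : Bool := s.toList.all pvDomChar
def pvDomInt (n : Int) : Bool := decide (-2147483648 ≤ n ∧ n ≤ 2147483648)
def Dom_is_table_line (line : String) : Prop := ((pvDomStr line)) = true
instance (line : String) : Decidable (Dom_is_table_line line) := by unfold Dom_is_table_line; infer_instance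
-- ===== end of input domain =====

set_option maxRecDepth 10000


-- B replaces split on the pipe character + slice + stripped-parts any() by a single scan of the
-- stripped line's interior for a character that is neither a pipe nor whitespace (objective: simpler).

-- ===== PORT A =====
def is_table_line (line : String) : Bool :=
  let l : List Char := (PySem.Str.strip line).toList
  if l.isEmpty then false
  else if PySem.Chars.startswith l ['|'] && PySem.Chars.endswith l ['|'] then
    let parts := PySem.Chars.splitOn l ['|']
    if 3 ≤ parts.length then
      let content_parts := (PySem.List.slice parts (some 1) (some (-1))).map PySem.Chars.strip
      content_parts.any (fun p => !p.isEmpty)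
    else false
  else false

-- ===== PORT B =====
def is_table_line_alt (line : String) : Bool :=
  let s : List Char := (PySem.Str.strip line).toList
  if s.length < 2 || !(PySem.List.pyGetD s 0 ' ' = '|' : Bool) || !(PySem.List.pyGetD s (-1) ' ' = '|' : Bool) then
    false
  else
    (PySem.List.slice s (some 1) (some (-1))).any (fun c => decide (c ≠ '|') && !PySem.Chars.isspace c)

-- ===== PRECONDITION & SPEC =====
def Spec_is_table_line (line : String) (out : Bool) : Prop := out = is_table_line_alt line
instance (line : String) (out : Bool) : Decidable (Spec_is_table_line line out) := by unfold Spec_is_table_line; infer_instance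

-- ===== CLAIM (what is proved, stated in full; the proofs are below) =====
def Claim_equal_is_table_line : Prop := ∀ (line : String), Dom_is_table_line line → Spec_is_table_line line (is_table_line line)

-- ===== LEMMAS AND PROOFS =====

def spAux (c : Char) : List Char → List Char → List (List Char)
  | [], cur => [cur.reverse]
  | x :: xs, cur => if x = c then cur.reverse :: spAux c xs [] else spAux c xs (x :: cur)

lemma go_eq_spAux (c : Char) (l : List Char) :
    ∀ (fuel : Nat) (cur : List Char) (acc : List (List Char)), l.length < fuel →
    PySem.Chars.splitOn.go [c] fuel l cur acc = acc.reverse ++ spAux c l cur := by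
  induction l with
  | nil =>
    intro fuel cur acc h
    match fuel, h with
    | fuel + 1, _ => rw [PySem.Chars.splitOn.go.eq_def]; simp [spAux]
  | cons x xs ih =>
    intro fuel cur acc h
    match fuel, h with
    | fuel + 1, h =>
      rw [PySem.Chars.splitOn.go.eq_def]
      simp only [List.isPrefixOf, Bool.and_true]
      by_cases hx : x = c
      · subst hx
        simp only [beq_self_eq_true, if_pos, List.length_cons, List.drop_succ_cons,
          List.length_nil, List.drop_zero, spAux]
        rw [ih fuel [] (cur.reverse :: acc) (Nat.lt_of_succ_lt_succ h)]
        rw [List.reverse_cons, List.append_assoc, List.singleton_append]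
      · have hbx : (c == x) = false := beq_eq_false_iff_ne.mpr (fun h' => hx h'.symm)
        simp only [hbx, Bool.false_eq_true, if_false, spAux, if_neg hx]
        exact ih fuel (x :: cur) acc (Nat.lt_of_succ_lt_succ h)

lemma splitOn_single (c : Char) (l : List Char) :
    PySem.Chars.splitOn l [c] = spAux c l [] := by
  unfold PySem.Chars.splitOn
  rw [go_eq_spAux c l (l.length + 1) [] [] (Nat.lt_succ_self _)]
  simp

lemma spAux_ne_nil (c : Char) (l cur : List Char) : spAux c l cur ≠ [] := by
  induction l generalizing cur with
  | nil => simp [spAux]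
  | cons x xs ih => by_cases hx : x = c <;> simp [spAux, hx, ih]

lemma spAux_append_sep (c : Char) (m : List Char) :
    ∀ cur, spAux c (m ++ [c]) cur = spAux c m cur ++ [[]] := by
  induction m with
  | nil => intro cur; simp [spAux]
  | cons x xs ih => intro cur; by_cases hx : x = c <;> simp [spAux, hx, ih]

lemma flatten_spAux (c : Char) (m : List Char) :
    ∀ cur, (spAux c m cur).flatten = cur.reverse ++ m.filter (fun x => x != c) := by
  induction m with
  | nil => intro cur; simp [spAux]
  | cons x xs ih =>
    intro cur
    by_cases hx : x = c
    · subst hx; simp [spAux, ih]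
    · simp [spAux, hx, ih]

lemma all_dropWhile (u : List Char) (p : Char → Bool) : (u.dropWhile p).all p = u.all p := by
  induction u with
  | nil => rfl
  | cons x xs ih => by_cases h : p x <;> simp [h, ih]

lemma strip_eq_nil_iff (u : List Char) :
    (PySem.Chars.strip u).isEmpty = u.all PySem.Chars.isspace := by
  unfold PySem.Chars.strip PySem.Chars.rstrip PySem.Chars.lstrip
  rcases h : (((u.dropWhile PySem.Chars.isspace).reverse.dropWhile PySem.Chars.isspace).reverse).isEmpty with _ | _
  · symm
    rw [List.isEmpty_eq_false_iff] at h
    rw [← Bool.not_eq_true, List.all_eq_true]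
    intro hall
    apply h
    rw [List.reverse_eq_nil_iff, List.dropWhile_eq_nil_iff]
    intro x hx
    exact hall x ((List.dropWhile_sublist _).subset (List.mem_reverse.mp hx))
  · symm
    rw [List.isEmpty_iff, List.reverse_eq_nil_iff, List.dropWhile_eq_nil_iff] at h
    rw [← all_dropWhile u, List.all_eq_true]
    intro x hx
    exact h x (List.mem_reverse.mpr hx)

lemma slice_one_negone {α : Type} (a b : α) (xs : List α) :
    PySem.List.slice (a :: (xs ++ [b])) (some 1) (some (-1)) = xs := by
  simp [PySem.List.slice, PySem.List.clampIdx]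
  rw [if_neg (by omega), List.take_append_of_le_length (by omega), List.take_of_length_le (by omega)]

lemma core_eq (t : List Char) :
    (if t.isEmpty then false
     else if PySem.Chars.startswith t ['|'] && PySem.Chars.endswith t ['|'] then
       let parts := PySem.Chars.splitOn t ['|']
       if 3 ≤ parts.length then
         ((PySem.List.slice parts (some 1) (some (-1))).map PySem.Chars.strip).any (fun p => !p.isEmpty)
       else false
     else false)
    =
    (if t.length < 2 || !(PySem.List.pyGetD t 0 ' ' = '|' : Bool) || !(PySem.List.pyGetD t (-1) ' ' = '|' : Bool) then
       false
     else
       (PySem.List.slice t (some 1) (some (-1))).any (fun c => decide (c ≠ '|') && !PySem.Chars.isspace c)) := by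
  match t with
  | [] => rfl
  | [x] =>
    by_cases hx : x = '|'
    · subst hx; decide
    · have h1 : PySem.Chars.startswith [x] ['|'] = false := by
        unfold PySem.Chars.startswith List.isPrefixOf
        simp [beq_eq_false_iff_ne.mpr (fun h' => hx h'.symm)]
      rw [h1]
      have h2 : ([x].length < 2 || !(PySem.List.pyGetD [x] 0 ' ' = '|' : Bool)
          || !(PySem.List.pyGetD [x] (-1) ' ' = '|' : Bool)) = true := by
        simp
      rw [h2]
      simp
  | x :: y :: r =>
    rcases List.eq_nil_or_concat (y :: r) with h | ⟨m, d, hmd⟩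
    · exact absurd h (by simp)
    rw [List.concat_eq_append] at hmd
    rw [hmd]
    have hget0 : PySem.List.pyGetD (x :: (m ++ [d])) 0 ' ' = x := PySem.List.pyGetD_zero_cons _ _ _
    have hgetm1 : PySem.List.pyGetD (x :: (m ++ [d])) (-1) ' ' = d := by
      have := PySem.List.pyGetD_neg_one_append_singleton (x :: m) d ' '
      simpa using this
    rw [show ((x :: (m ++ [d])).isEmpty) = false from rfl]
    by_cases hx : x = '|'
    · by_cases hd : d = '|'
      · subst hx; subst hd
        -- both sides take their main branch
        have hsw : PySem.Chars.startswith ('|' :: (m ++ ['|'])) ['|'] = true := by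
          unfold PySem.Chars.startswith List.isPrefixOf
          simp
        have hew : PySem.Chars.endswith ('|' :: (m ++ ['|'])) ['|'] = true := by
          rw [PySem.Chars.endswith_iff]
          exact ⟨'|' :: m, rfl⟩
        have hcond : ((('|' :: (m ++ ['|'])).length < 2 : Prop)
            || !(PySem.List.pyGetD ('|' :: (m ++ ['|'])) 0 ' ' = '|' : Bool)
            || !(PySem.List.pyGetD ('|' :: (m ++ ['|'])) (-1) ' ' = '|' : Bool)) = false := by
          rw [hget0, hgetm1]
          simp
        rw [hsw, hew, hcond]
        have hsplit : PySem.Chars.splitOn ('|' :: (m ++ ['|'])) ['|']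
            = [] :: (spAux '|' m [] ++ [[]]) := by
          rw [splitOn_single]
          show (if ('|' : Char) = '|' then List.reverse [] :: spAux '|' (m ++ ['|']) [] else _) = _
          rw [if_pos rfl, spAux_append_sep]
          rfl
        simp only [Bool.and_self, if_true, Bool.false_eq_true, if_false, hsplit]
        have h2 : 1 ≤ (spAux '|' m []).length := by
          cases h : spAux '|' m [] with
          | nil => exact absurd h (spAux_ne_nil '|' m [])
          | cons a b => simp
        rw [if_pos (show 3 ≤ ([] :: (spAux '|' m [] ++ [[]]) : List (List Char)).length by
          simp only [List.length_cons, List.length_append, List.length_nil]; omega)]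
        rw [slice_one_negone, slice_one_negone]
        -- any over stripped parts = any over interior characters
        rw [List.any_map]
        have hpt : ((fun p => !p.isEmpty) ∘ PySem.Chars.strip)
            = (fun p : List Char => p.any (fun y => !PySem.Chars.isspace y)) := by
          funext p
          simp only [Function.comp_apply, strip_eq_nil_iff]
          rw [List.any_eq_not_all_not]
          simp
        rw [hpt, ← List.any_flatten, flatten_spAux]
        rw [List.reverse_nil, List.nil_append, List.any_filter]
        have hfun : (fun a : Char => (a != '|') && !PySem.Chars.isspace a)
            = (fun c : Char => decide (c ≠ '|') && !PySem.Chars.isspace c) := by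
          funext a
          cases h : decide (a = '|') with
          | true => simp [of_decide_eq_true h]
          | false => simp [bne, h]; intro _; exact of_decide_eq_false h
        rw [hfun]
      · have hew : PySem.Chars.endswith (x :: (m ++ [d])) ['|'] = false := by
          rw [← Bool.not_eq_true, PySem.Chars.endswith_iff]
          rintro ⟨u, hu⟩
          rw [show x :: (m ++ [d]) = (x :: m) ++ [d] by simp] at hu
          have hg := congrArg List.getLast? hu
          rw [List.getLast?_append, List.getLast?_append] at hg
          simp at hg
          exact hd hg.symm
        rw [hew, Bool.and_false]
        have hcond : (((x :: (m ++ [d])).length < 2 : Prop)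
            || !(PySem.List.pyGetD (x :: (m ++ [d])) 0 ' ' = '|' : Bool)
            || !(PySem.List.pyGetD (x :: (m ++ [d])) (-1) ' ' = '|' : Bool)) = true := by
          rw [hgetm1]
          simp [hd]
        rw [hcond]
        simp
    · have hsw : PySem.Chars.startswith (x :: (m ++ [d])) ['|'] = false := by
        unfold PySem.Chars.startswith List.isPrefixOf
        simp [beq_eq_false_iff_ne.mpr (fun h' => hx h'.symm)]
      rw [hsw, Bool.false_and]
      have hcond : (((x :: (m ++ [d])).length < 2 : Prop)
          || !(PySem.List.pyGetD (x :: (m ++ [d])) 0 ' ' = '|' : Bool)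
          || !(PySem.List.pyGetD (x :: (m ++ [d])) (-1) ' ' = '|' : Bool)) = true := by
        rw [hget0]
        simp [hx]
      rw [hcond]
      simp

-- ===== VERDICT (by name: the statement is the Claim_ definition above) =====
theorem is_table_line_spec : Claim_equal_is_table_line := by
  intro line _
  unfold Spec_is_table_line is_table_line is_table_line_alt
  exact core_eq ((PySem.Str.strip line).toList)
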